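-- pv_equiv track=rewrite | github.com/clb17151/Battlesnake | server_logic.py | avoid_other_snakes
-- ===== SOURCE A (Python) =====
-- from typing import List, Dict
--
-- def avoid_other_snakes(my_head: Dict[str, int], enemy_snake: List[dict],
--                        possible_moves: List[str]):
--     for s in enemy_snake:
--         current_snake = s["body"][:-1]
--         for snake_body in current_snake:
--             if my_head["x"] == snake_body["x"] + 1 and my_head[
--                     "y"] == snake_body["y"] and "left" in possible_moves:
--                 possible_moves.remove("left")
--             elif my_head["x"] == snake_body["x"] - 1 and my_head[
--                     "y"] == snake_body["y"] and "right" in possible_moves: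
--                 possible_moves.remove("right")
--             elif my_head["y"] == snake_body["y"] + 1 and my_head[
--                     "x"] == snake_body["x"] and "down" in possible_moves:
--                 possible_moves.remove("down")
--             elif my_head["y"] == snake_body["y"] - 1 and my_head[
--                     "x"] == snake_body["x"] and "up" in possible_moves:
--                 possible_moves.remove("up")
--     return possible_moves
-- ===== SOURCE B (Python) =====
-- from typing import List, Dict
--
-- def avoid_other_snakes(my_head: Dict[str, int], enemy_snake: List[dict],
--                        possible_moves: List[str]):
--     segments = [seg for s in enemy_snake for seg in s["body"][:-1]]
--     if not segments:
--         return possible_moves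
--     # Count enemy body segments per cell (one pass over the segments).
--     cells = {}
--     for seg in segments:
--         cell = (seg["x"], seg["y"])
--         cells[cell] = cells.get(cell, 0) + 1
--     x, y = my_head["x"], my_head["y"]
--     # How many copies of each move must be dropped (capped automatically by
--     # availability in the single pass below).
--     drop = {
--         "left": cells.get((x - 1, y), 0),
--         "right": cells.get((x + 1, y), 0),
--         "down": cells.get((x, y - 1), 0),
--         "up": cells.get((x, y + 1), 0),
--     }
--     kept = []
--     for m in possible_moves:
--         if drop.get(m, 0) > 0:
--             drop[m] -= 1
--         else:
--             kept.append(m)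
--     possible_moves[:] = kept
--     return possible_moves
-- ===== Notes on version B (the rewrite author's own statement) =====
-- stated objective: faster
-- what changed: Instead of A's per-segment scan of possible_moves (membership test plus list.remove for every enemy body segment), B counts enemy segments per cell in one dict pass, reads off the four neighbour cells of the head as per-direction drop counts, and rebuilds the moves list in a single pass that skips that many occurrences of each direction.
import Mathlib
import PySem

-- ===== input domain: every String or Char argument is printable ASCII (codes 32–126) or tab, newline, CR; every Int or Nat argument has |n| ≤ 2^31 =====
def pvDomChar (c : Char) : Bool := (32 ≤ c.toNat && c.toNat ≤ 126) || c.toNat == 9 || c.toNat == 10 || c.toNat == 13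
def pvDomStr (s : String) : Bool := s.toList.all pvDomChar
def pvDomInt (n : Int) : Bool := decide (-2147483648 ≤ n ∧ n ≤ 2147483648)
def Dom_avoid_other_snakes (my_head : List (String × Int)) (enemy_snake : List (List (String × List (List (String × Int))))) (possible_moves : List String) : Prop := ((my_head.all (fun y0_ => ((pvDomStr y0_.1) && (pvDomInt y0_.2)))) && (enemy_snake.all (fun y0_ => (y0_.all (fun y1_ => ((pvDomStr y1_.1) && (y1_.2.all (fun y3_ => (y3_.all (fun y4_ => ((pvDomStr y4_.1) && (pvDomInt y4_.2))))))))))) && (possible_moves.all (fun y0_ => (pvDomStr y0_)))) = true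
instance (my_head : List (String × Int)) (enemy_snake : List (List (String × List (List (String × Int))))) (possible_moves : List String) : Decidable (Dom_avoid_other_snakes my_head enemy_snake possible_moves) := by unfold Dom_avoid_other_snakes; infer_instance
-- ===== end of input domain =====

-- B replaces A's per-segment scan-and-remove of the moves list by one counting dict over
-- the enemy segments plus a single skip-pass over the moves (objective: faster — it removes
-- A's inner scans of possible_moves; asymptotic claim per claim.json, not separately timed here).
-- Python A and B both mutate/return the caller's possible_moves list; equality here is about the returned value.

-- ===== PORT A =====
-- shared dict-access helpers (Python d["k"]; total via getD, Pre_ guarantees the key is present)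
def getI (d : List (String × Int)) (k : String) : Int :=
  ((PySem.Dict.mk d).get? k).getD 0
def getBody (s : List (String × List (List (String × Int)))) : List (List (String × Int)) :=
  ((PySem.Dict.mk s).get? "body").getD []

-- the body of A's inner loop, step for step (elif chain; list.remove via PySem.List.remove?)
def aInner (my_head : List (String × Int)) (moves : List String) (snake_body : List (String × Int)) : List String :=
  if getI my_head "x" == getI snake_body "x" + 1 && getI my_head "y" == getI snake_body "y" && moves.contains "left" then
    (PySem.List.remove? moves "left").getD moves
  else if getI my_head "x" == getI snake_body "x" - 1 && getI my_head "y" == getI snake_body "y" && moves.contains "right" then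
    (PySem.List.remove? moves "right").getD moves
  else if getI my_head "y" == getI snake_body "y" + 1 && getI my_head "x" == getI snake_body "x" && moves.contains "down" then
    (PySem.List.remove? moves "down").getD moves
  else if getI my_head "y" == getI snake_body "y" - 1 && getI my_head "x" == getI snake_body "x" && moves.contains "up" then
    (PySem.List.remove? moves "up").getD moves
  else moves

def avoid_other_snakes (my_head : List (String × Int)) (enemy_snake : List (List (String × List (List (String × Int))))) (possible_moves : List String) : List String :=
  enemy_snake.foldl (fun moves s =>
    (PySem.List.slice (getBody s) none (some (-1))).foldl (aInner my_head) moves) possible_moves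

-- ===== PORT B =====
-- cells[cell] = cells.get(cell, 0) + 1
def bCellStep (c : PySem.Dict (Int × Int) Int) (seg : List (String × Int)) : PySem.Dict (Int × Int) Int :=
  c.insert (getI seg "x", getI seg "y") (c.getD (getI seg "x", getI seg "y") 0 + 1)

-- one step of B's single pass over possible_moves (state: kept list so far, remaining drop counts)
def bPassStep (st : List String × PySem.Dict String Int) (m : String) : List String × PySem.Dict String Int :=
  if st.2.getD m 0 > 0 then (st.1, st.2.insert m (st.2.getD m 0 - 1)) else (st.1 ++ [m], st.2)

def avoid_other_snakes_alt (my_head : List (String × Int)) (enemy_snake : List (List (String × List (List (String × Int))))) (possible_moves : List String) : List String :=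
  let segments := enemy_snake.flatMap (fun s => PySem.List.slice (getBody s) none (some (-1)))
  if segments = [] then possible_moves
  else
    let cells := segments.foldl bCellStep PySem.Dict.empty
    let x := getI my_head "x"
    let y := getI my_head "y"
    let drop : PySem.Dict String Int := PySem.Dict.mk
      [("left", cells.getD (x - 1, y) 0), ("right", cells.getD (x + 1, y) 0),
       ("down", cells.getD (x, y - 1) 0), ("up", cells.getD (x, y + 1) 0)]
    (possible_moves.foldl bPassStep ([], drop)).1

-- ===== PRECONDITION & SPEC =====
-- Pre_ excludes exactly the inputs where Python A raises KeyError: a snake without a "body"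
-- key, a counted body segment (body[:-1]) without "x"/"y", or — when at least one counted
-- segment exists, so the head is actually read — my_head without "x"/"y".
def Pre_avoid_other_snakes (my_head : List (String × Int)) (enemy_snake : List (List (String × List (List (String × Int))))) (possible_moves : List String) : Prop :=
  (enemy_snake.all (fun s => (PySem.Dict.mk s).contains "body" &&
     (getBody s).dropLast.all (fun seg =>
        (PySem.Dict.mk seg).contains "x" && (PySem.Dict.mk seg).contains "y")) &&
   (enemy_snake.all (fun s => (getBody s).dropLast.isEmpty) ||
    ((PySem.Dict.mk my_head).contains "x" && (PySem.Dict.mk my_head).contains "y"))) = true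
instance (my_head : List (String × Int)) (enemy_snake : List (List (String × List (List (String × Int))))) (possible_moves : List String) : Decidable (Pre_avoid_other_snakes my_head enemy_snake possible_moves) := by unfold Pre_avoid_other_snakes; infer_instance

def pvWitness_avoid_other_snakes : (List (String × Int)) × (List (List (String × List (List (String × Int))))) × List String :=
  ([("x", 1), ("y", 1)],
   [[("body", [[("x", 0), ("y", 1)], [("x", 0), ("y", 0)]])]],
   ["up", "left", "right"])

def Spec_avoid_other_snakes (my_head : List (String × Int)) (enemy_snake : List (List (String × List (List (String × Int))))) (possible_moves : List String) (out : List String) : Prop := out = avoid_other_snakes_alt my_head enemy_snake possible_moves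
instance (my_head : List (String × Int)) (enemy_snake : List (List (String × List (List (String × Int))))) (possible_moves : List String) (out : List String) : Decidable (Spec_avoid_other_snakes my_head enemy_snake possible_moves out) := by unfold Spec_avoid_other_snakes; infer_instance

-- ===== CLAIM (what is proved, stated in full; the proofs are below) =====
def Claim_equal_avoid_other_snakes : Prop := ∀ (my_head : List (String × Int)) (enemy_snake : List (List (String × List (List (String × Int))))) (possible_moves : List String), Dom_avoid_other_snakes my_head enemy_snake possible_moves → Pre_avoid_other_snakes my_head enemy_snake possible_moves → Spec_avoid_other_snakes my_head enemy_snake possible_moves (avoid_other_snakes my_head enemy_snake possible_moves)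

-- ===== LEMMAS AND PROOFS =====

-- direction of a body segment (sx,sy) adjacent to the head (hx,hy), if any
def segDir (hx hy sx sy : Int) : Option String :=
  if hx = sx + 1 ∧ hy = sy then some "left"
  else if hx = sx - 1 ∧ hy = sy then some "right"
  else if hy = sy + 1 ∧ hx = sx then some "down"
  else if hy = sy - 1 ∧ hx = sx then some "up"
  else none

-- B's single pass, abstractly: drop the first (c m) occurrences of each m
def skipC : List String → (String → Int) → List String
  | [], _ => []
  | m :: ms, c =>
    if 0 < c m then skipC ms (Function.update c m (c m - 1)) else m :: skipC ms c

theorem skipC_zero (ms : List String) : skipC ms (fun _ => (0 : Int)) = ms := by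
  induction ms with
  | nil => rfl
  | cons m ms ih => simp [skipC, ih]

theorem remove_getD_eq_erase (moves : List String) (d : String) :
    (PySem.List.remove? moves d).getD moves = moves.erase d := by
  by_cases h : d ∈ moves
  · rw [PySem.List.remove?_eq_some_erase moves d h]; rfl
  · rw [(PySem.List.remove?_eq_none_iff moves d).mpr h, Option.getD_none, List.erase_of_not_mem h]

theorem erase_skipC (ms : List String) (c : String → Int) (d : String)
    (hc : ∀ k, 0 ≤ c k) :
    (skipC ms c).erase d = skipC ms (Function.update c d (c d + 1)) := by
  induction ms generalizing c with
  | nil => simp [skipC]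
  | cons m ms ih =>
    by_cases hm : 0 < c m
    · have hm' : 0 < Function.update c d (c d + 1) m := by
        by_cases hmd : m = d
        · subst hmd; simp; omega
        · simpa [Function.update_of_ne hmd] using hm
      rw [skipC, if_pos hm, skipC, if_pos hm',
        ih _ (fun k => by have := hc k; by_cases hk : k = m <;> simp [Function.update_apply, hk] <;> omega)]
      congr 1
      by_cases hdm : d = m
      · subst hdm
        simp only [Function.update_idem, Function.update_self]
        norm_num
      · funext k
        rcases eq_or_ne k d with rfl | hkd <;> rcases eq_or_ne k m with rfl | hkm <;>
          simp_all [Function.update_apply]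
    · have hm0 : c m = 0 := le_antisymm (by omega) (hc m)
      rw [skipC, if_neg hm]
      by_cases hmd : m = d
      · subst hmd
        have h1 : 0 < Function.update c m (c m + 1) m := by simp; omega
        rw [List.erase_cons_head, skipC, if_pos h1]
        have h2 : Function.update (Function.update c m (c m + 1)) m (Function.update c m (c m + 1) m - 1) = c := by
          funext k
          rcases eq_or_ne k m with rfl | hkm <;> simp_all [Function.update_apply]
        rw [h2]
      · have h2 : ¬ 0 < Function.update c d (c d + 1) m := by
          simp [Function.update_of_ne hmd]; omega
        rw [skipC, if_neg h2, List.erase_cons_tail (by simp [hmd]), ih c hc]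

-- A's inner step is: erase the segment's direction (if any)
theorem aInner_eq (my_head : List (String × Int)) (moves : List String)
    (seg : List (String × Int)) :
    aInner my_head moves seg =
      match segDir (getI my_head "x") (getI my_head "y") (getI seg "x") (getI seg "y") with
      | some d => moves.erase d
      | none => moves := by
  unfold aInner segDir
  set hx := getI my_head "x" with hhx
  set hy := getI my_head "y" with hhy
  set sx := getI seg "x" with hsx
  set sy := getI seg "y" with hsy
  have n1 : sx + 1 ≠ sx - 1 := by omega
  have n2 : sx - 1 ≠ sx + 1 := by omega
  have n3 : sx ≠ sx + 1 := by omega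
  have n4 : sx ≠ sx - 1 := by omega
  have n5 : sy + 1 ≠ sy - 1 := by omega
  have n6 : sy - 1 ≠ sy + 1 := by omega
  have n7 : sy ≠ sy + 1 := by omega
  have n8 : sy ≠ sy - 1 := by omega
  have n9 : sx + 1 ≠ sx := by omega
  have n10 : sx - 1 ≠ sx := by omega
  have n11 : sy + 1 ≠ sy := by omega
  have n12 : sy - 1 ≠ sy := by omega
  by_cases g1 : hx = sx + 1 ∧ hy = sy
  · by_cases hm : "left" ∈ moves
    · simp [g1.1, g1.2, hm, remove_getD_eq_erase, n1, n2, n3, n4, n5, n6, n7, n8, n9, n10, n11, n12]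
    · simp [g1.1, g1.2, hm, n1, n2, n3, n4, n5, n6, n7, n8, n9, n10, n11, n12, List.erase_of_not_mem hm]
  · by_cases g2 : hx = sx - 1 ∧ hy = sy
    · by_cases hm : "right" ∈ moves
      · simp [g1, g2.1, g2.2, hm, remove_getD_eq_erase, n1, n2, n3, n4, n5, n6, n7, n8, n9, n10, n11, n12]
      · simp [g1, g2.1, g2.2, hm, n1, n2, n3, n4, n5, n6, n7, n8, n9, n10, n11, n12, List.erase_of_not_mem hm]
    · by_cases g3 : hy = sy + 1 ∧ hx = sx
      · by_cases hm : "down" ∈ moves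
        · simp [g1, g2, g3.1, g3.2, hm, remove_getD_eq_erase, n1, n2, n3, n4, n5, n6, n7, n8, n9, n10, n11, n12]
        · simp [g1, g2, g3.1, g3.2, hm, n1, n2, n3, n4, n5, n6, n7, n8, n9, n10, n11, n12, List.erase_of_not_mem hm]
      · by_cases g4 : hy = sy - 1 ∧ hx = sx
        · by_cases hm : "up" ∈ moves
          · simp [g1, g2, g3, g4.1, g4.2, hm, remove_getD_eq_erase, n1, n2, n3, n4, n5, n6, n7, n8, n9, n10, n11, n12]
          · simp [g1, g2, g3, g4.1, g4.2, hm, n1, n2, n3, n4, n5, n6, n7, n8, n9, n10, n11, n12, List.erase_of_not_mem hm]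
        · simp [g1, g2, g3, g4]

-- flatten the nested snake/segment loops
theorem foldl_nested {α β σ : Type} (g : α → List β) (f : σ → β → σ)
    (l : List α) (init : σ) :
    l.foldl (fun acc s => (g s).foldl f acc) init = (l.flatMap g).foldl f init := by
  induction l generalizing init with
  | nil => rfl
  | cons s l ih => simp [List.flatMap_cons, List.foldl_append, ih]

-- per-direction drop count demanded by the segment list
def cntf (hx hy : Int) (segs : List (List (String × Int))) (d : String) : Int :=
  (segs.countP (fun seg => segDir hx hy (getI seg "x") (getI seg "y") == some d) : Nat)

-- core invariant: running A's steps from a partially-skipped list just adds the counts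
theorem foldl_aInner_skipC (my_head : List (String × Int))
    (segs : List (List (String × Int))) (ms : List String) (c : String → Int)
    (hc : ∀ k, 0 ≤ c k) :
    segs.foldl (aInner my_head) (skipC ms c) =
      skipC ms (fun d => c d + cntf (getI my_head "x") (getI my_head "y") segs d) := by
  induction segs generalizing c with
  | nil => simp [cntf]
  | cons seg segs ih =>
    cases hdir : segDir (getI my_head "x") (getI my_head "y") (getI seg "x") (getI seg "y") with
    | none =>
      simp only [List.foldl_cons, aInner_eq, hdir]
      rw [ih c hc]
      congr 1
      funext d
      simp [cntf, List.countP_cons, hdir]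
    | some d =>
      simp only [List.foldl_cons, aInner_eq, hdir]
      rw [erase_skipC ms c d hc,
        ih _ (fun k => by have hk1 := hc k; have hk2 := hc d; by_cases hk : k = d <;> simp [Function.update_apply, hk] <;> omega)]
      congr 1
      funext k
      by_cases hk : k = d
      · subst hk
        simp [Function.update_apply, cntf, List.countP_cons, hdir]
        push_cast
        omega
      · simp [Function.update_apply, hk, Ne.symm hk, cntf, List.countP_cons, hdir]

-- B's pass computes skipC of the initial drop counts
theorem foldl_bPassStep (ms : List String) (acc : List String)
    (d : PySem.Dict String Int) :
    (ms.foldl bPassStep (acc, d)).1 = acc ++ skipC ms (fun k => d.getD k 0) := by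
  induction ms generalizing acc d with
  | nil => simp [skipC]
  | cons m ms ih =>
    rw [List.foldl_cons]
    by_cases h : 0 < d.getD m 0
    · rw [bPassStep, if_pos h, ih]
      rw [skipC, if_pos h]
      congr 2
      funext k
      by_cases hk : k = m <;> simp [PySem.Dict.getD_insert, Function.update_apply, hk]
    · rw [bPassStep, if_neg h, ih, skipC, if_neg h]
      simp

-- the counting dict counts segments per cell
theorem cells_getD (segs : List (List (String × Int)))
    (d : PySem.Dict (Int × Int) Int) (p : Int × Int) :
    (segs.foldl bCellStep d).getD p 0 =
      d.getD p 0 + (segs.countP (fun seg => (getI seg "x", getI seg "y") == p) : Nat) := by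
  induction segs generalizing d with
  | nil => simp
  | cons seg segs ih =>
    rw [List.foldl_cons, ih]
    rw [bCellStep, PySem.Dict.getD_insert]
    by_cases hp : p = (getI seg "x", getI seg "y")
    · simp [hp, List.countP_cons]
      omega
    · have hp' : (getI seg "x", getI seg "y") ≠ p := fun h => hp h.symm
      simp [hp, hp', List.countP_cons]

theorem segDir_values (hx hy sx sy : Int) :
    segDir hx hy sx sy = none ∨ segDir hx hy sx sy = some "left" ∨
    segDir hx hy sx sy = some "right" ∨ segDir hx hy sx sy = some "down" ∨
    segDir hx hy sx sy = some "up" := by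
  unfold segDir; split_ifs <;> simp

theorem segDir_eq_left (hx hy sx sy : Int) :
    (segDir hx hy sx sy == some "left") = ((sx, sy) == (hx - 1, hy)) := by
  unfold segDir; split_ifs <;> simp <;> omega

theorem segDir_eq_right (hx hy sx sy : Int) :
    (segDir hx hy sx sy == some "right") = ((sx, sy) == (hx + 1, hy)) := by
  unfold segDir; split_ifs <;> simp <;> omega

theorem segDir_eq_down (hx hy sx sy : Int) :
    (segDir hx hy sx sy == some "down") = ((sx, sy) == (hx, hy - 1)) := by
  unfold segDir; split_ifs <;> simp <;> omega

theorem segDir_eq_up (hx hy sx sy : Int) :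
    (segDir hx hy sx sy == some "up") = ((sx, sy) == (hx, hy + 1)) := by
  unfold segDir; split_ifs <;> simp <;> omega

-- ===== VERDICT (by name: the statement is the Claim_ definition above) =====
theorem avoid_other_snakes_spec : Claim_equal_avoid_other_snakes := by
  intro my_head enemy_snake possible_moves _ _
  unfold Spec_avoid_other_snakes avoid_other_snakes avoid_other_snakes_alt
  simp only [PySem.List.slice_to_neg_one]
  rw [foldl_nested]
  by_cases hseg : enemy_snake.flatMap (fun s => (getBody s).dropLast) = []
  · rw [hseg]
    simp
  rw [if_neg hseg]
  set segs := enemy_snake.flatMap (fun s => (getBody s).dropLast) with hsegs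
  rw [foldl_bPassStep]
  have hA := foldl_aInner_skipC my_head segs possible_moves (fun _ => 0) (fun _ => le_refl 0)
  rw [skipC_zero] at hA
  rw [hA, List.nil_append]
  congr 1
  funext k
  rw [cells_getD, cells_getD, cells_getD, cells_getD]
  simp only [PySem.Dict.getD_empty, zero_add]
  by_cases h1 : k = "left"
  · subst h1
    have hcnt : cntf (getI my_head "x") (getI my_head "y") segs "left"
        = ((segs.countP (fun seg => (getI seg "x", getI seg "y") == (getI my_head "x" - 1, getI my_head "y")) : Nat) : Int) := by
      unfold cntf
      norm_cast
      exact List.countP_congr (fun seg _ => by rw [segDir_eq_left])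
    simp [PySem.Dict.getD, PySem.Dict.get?_mk_cons, hcnt]
  by_cases h2 : k = "right"
  · subst h2
    have hcnt : cntf (getI my_head "x") (getI my_head "y") segs "right"
        = ((segs.countP (fun seg => (getI seg "x", getI seg "y") == (getI my_head "x" + 1, getI my_head "y")) : Nat) : Int) := by
      unfold cntf
      norm_cast
      exact List.countP_congr (fun seg _ => by rw [segDir_eq_right])
    simp [PySem.Dict.getD, PySem.Dict.get?_mk_cons, hcnt]
  by_cases h3 : k = "down"
  · subst h3
    have hcnt : cntf (getI my_head "x") (getI my_head "y") segs "down"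
        = ((segs.countP (fun seg => (getI seg "x", getI seg "y") == (getI my_head "x", getI my_head "y" - 1)) : Nat) : Int) := by
      unfold cntf
      norm_cast
      exact List.countP_congr (fun seg _ => by rw [segDir_eq_down])
    simp [PySem.Dict.getD, PySem.Dict.get?_mk_cons, hcnt]
  by_cases h4 : k = "up"
  · subst h4
    have hcnt : cntf (getI my_head "x") (getI my_head "y") segs "up"
        = ((segs.countP (fun seg => (getI seg "x", getI seg "y") == (getI my_head "x", getI my_head "y" + 1)) : Nat) : Int) := by
      unfold cntf
      norm_cast
      exact List.countP_congr (fun seg _ => by rw [segDir_eq_up])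
    simp [PySem.Dict.getD, PySem.Dict.get?_mk_cons, hcnt]
  · have h1' : ("left" : String) ≠ k := fun h => h1 h.symm
    have h2' : ("right" : String) ≠ k := fun h => h2 h.symm
    have h3' : ("down" : String) ≠ k := fun h => h3 h.symm
    have h4' : ("up" : String) ≠ k := fun h => h4 h.symm
    have hcnt : cntf (getI my_head "x") (getI my_head "y") segs k = 0 := by
      unfold cntf
      norm_cast
      rw [List.countP_eq_zero]
      intro seg _
      rcases segDir_values (getI my_head "x") (getI my_head "y") (getI seg "x") (getI seg "y") with h | h | h | h | h <;>
        simp [h, h1', h2', h3', h4']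
    simp [PySem.Dict.getD, PySem.Dict.get?_mk_cons, hcnt, h1', h2', h3', h4']
    rfl
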